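-- pv_equiv track=rewrite | github.com/kwinata/cp | cf-codeforces/1255-b1.py | minimum_show
-- ===== SOURCE A (Python) =====
-- class Multiset:
--     def __init__(self, initial):
--         self.d = {}
--         for i in initial:
--             self.add(i)
--
--     def add(self, i):
--         if i in self.d:
--             self.d[i] += 1
--         else:
--             self.d[i] = 1
--
--     def remove(self, i):
--         if i not in self.d:
--             raise KeyError()
--         if self.d[i] == 1:
--             del self.d[i]
--         else:
--             self.d[i] -= 1
--
--     def size(self):
--         return len(self.d)
--
-- def minimum_show(d, shows) -> int:
--     frame = Multiset(shows[:d])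
--     min_show = frame.size()
--     for i in range(0, len(shows)-d):
--         frame.remove(shows[i])
--         frame.add(shows[i+d])
--         min_show = min(min_show, frame.size())
--     return min_show
-- ===== SOURCE B (Python) =====
-- def minimum_show(d, shows) -> int:
--     res = len(set(shows[:d]))
--     for i in range(1, len(shows) - d + 1):
--         res = min(res, len(set(shows[i:i + d])))
--     return res
-- ===== Notes on version B (the rewrite author's own statement) =====
-- stated objective: simpler
-- what changed: Replaced the incremental Multiset class with its add/remove streaming updates by a direct recomputation: take the min over len(set(window)) for each size-d slice, no mutable state.
import Mathlib
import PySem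

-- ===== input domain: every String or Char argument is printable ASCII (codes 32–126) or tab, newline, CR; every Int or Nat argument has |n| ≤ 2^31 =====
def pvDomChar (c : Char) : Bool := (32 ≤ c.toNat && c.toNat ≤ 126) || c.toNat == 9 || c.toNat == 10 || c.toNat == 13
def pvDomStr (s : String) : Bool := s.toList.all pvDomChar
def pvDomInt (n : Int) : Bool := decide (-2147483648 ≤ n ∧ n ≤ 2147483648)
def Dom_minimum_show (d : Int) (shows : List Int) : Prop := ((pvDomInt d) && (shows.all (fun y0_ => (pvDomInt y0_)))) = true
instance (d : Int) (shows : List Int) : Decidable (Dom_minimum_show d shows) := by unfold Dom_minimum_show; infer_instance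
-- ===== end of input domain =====

-- B replaces A's incremental Multiset (add/remove streaming) by recomputing each window's
-- distinct count directly (simpler: no mutable state); not claimed faster.

-- ===== PORT A =====
-- Multiset.add: if i in d: d[i] += 1 else: d[i] = 1
def msAdd (dd : PySem.Dict Int Int) (i : Int) : PySem.Dict Int Int :=
  if dd.contains i then dd.insert i (dd.getD i 0 + 1) else dd.insert i 1

-- Multiset.remove: raise KeyError if absent (none); del if count 1 else decrement
def msRemove (dd : PySem.Dict Int Int) (i : Int) : Option (PySem.Dict Int Int) :=
  if !dd.contains i then none
  else if dd.getD i 0 = 1 then some (dd.erase i) else some (dd.insert i (dd.getD i 0 - 1))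

-- loop body of A: frame.remove(shows[i]); frame.add(shows[i+d]); min_show = min(min_show, frame.size())
def loopA (shows : List Int) (d : Int) (acc : Option (PySem.Dict Int Int × Int)) (i : Int) :
    Option (PySem.Dict Int Int × Int) :=
  match acc with
  | none => none
  | some (fr, m) =>
    match msRemove fr (PySem.List.pyGetD shows i 0) with
    | none => none
    | some fr1 =>
      some (msAdd fr1 (PySem.List.pyGetD shows (i + d) 0),
        min m ((msAdd fr1 (PySem.List.pyGetD shows (i + d) 0)).size : Int))

def minimum_show (d : Int) (shows : List Int) : Int :=
  let frame := (PySem.List.slice shows none (some d)).foldl msAdd PySem.Dict.empty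
  let st := (PySem.List.pyRange 0 (PySem.List.len shows - d) 1).foldl (loopA shows d)
    (some (frame, (frame.size : Int)))
  match st with
  | some (_, m) => m
  | none => 0

-- ===== PORT B =====
-- len(set(w))
def winDistinct (w : List Int) : Int := PySem.Set.len (PySem.Set.ofList w)

-- loop body of B: res = min(res, len(set(shows[i:i+d])))
def loopB (shows : List Int) (d : Int) (res : Int) (i : Int) : Int :=
  min res (winDistinct (PySem.List.slice shows (some i) (some (i + d))))

def minimum_show_alt (d : Int) (shows : List Int) : Int :=
  let res := winDistinct (PySem.List.slice shows none (some d))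
  (PySem.List.pyRange 1 (PySem.List.len shows - d + 1) 1).foldl (loopB shows d) res

-- ===== PRECONDITION & SPEC =====
-- A raises (KeyError/IndexError) whenever d < 0, or d = 0 with non-empty shows: the loop
-- removes a sliding element that was never added. Exactly those inputs are excluded.
def Pre_minimum_show (d : Int) (shows : List Int) : Prop := 1 ≤ d ∨ (d = 0 ∧ shows = [])
instance (d : Int) (shows : List Int) : Decidable (Pre_minimum_show d shows) := by
  unfold Pre_minimum_show; infer_instance

def pvWitness_minimum_show : Int × List Int := (2, [1, 2, 1, 3])

def Spec_minimum_show (d : Int) (shows : List Int) (out : Int) : Prop := out = minimum_show_alt d shows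
instance (d : Int) (shows : List Int) (out : Int) : Decidable (Spec_minimum_show d shows out) := by
  unfold Spec_minimum_show; infer_instance

-- ===== CLAIM (what is proved, stated in full; the proofs are below) =====
def Claim_equal_minimum_show : Prop := ∀ (d : Int) (shows : List Int), Dom_minimum_show d shows → Pre_minimum_show d shows → Spec_minimum_show d shows (minimum_show d shows)

-- ===== LEMMAS AND PROOFS =====

-- dd represents the multiset of w: unique keys, and lookup = positive count
def MsInv (w : List Int) (dd : PySem.Dict Int Int) : Prop :=
  dd.keys.Nodup ∧ ∀ v : Int, dd.get? v = if w.count v = 0 then none else some ((w.count v : Int))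

-- the window starting at i
def win (shows : List Int) (dn i : Nat) : List Int := (shows.drop i).take dn

lemma find?_filter_ne (l : List (Int × Int)) (k v : Int) :
    List.find? (fun p => p.1 == v) (l.filter (fun p => !(p.1 == k)))
      = if v = k then none else List.find? (fun p => p.1 == v) l := by
  induction l with
  | nil => simp
  | cons p t ih =>
    by_cases hvk : v = k <;> by_cases hpk : p.1 = k
    · have hpv : p.1 = v := by omega
      simp [hpk, hvk]
    · have hpv : ¬ p.1 = v := by omega
      simp [hpk, hvk]
    · have hpv : ¬ p.1 = v := by omega
      simp [hpk, hvk, ih,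
        show ¬ k = v from fun h => hvk h.symm]
    · by_cases hpv : p.1 = v <;>
        simp [hpk, hpv, hvk, ih]

lemma dict_get?_erase (dd : PySem.Dict Int Int) (k v : Int) (h : dd.keys.Nodup) :
    (dd.erase k).get? v = if v = k then none else dd.get? v := by
  obtain ⟨l⟩ := dd
  simp only [PySem.Dict.erase, PySem.Dict.get?]
  rw [find?_filter_ne]
  split <;> rfl

lemma dict_keys_erase_nodup (dd : PySem.Dict Int Int) (k : Int) (h : dd.keys.Nodup) :
    (dd.erase k).keys.Nodup := by
  obtain ⟨l⟩ := dd
  simp only [PySem.Dict.erase, PySem.Dict.keys] at *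
  exact h.sublist (List.Sublist.map _ List.filter_sublist)

lemma inv_empty : MsInv [] PySem.Dict.empty := by
  refine ⟨by simp [PySem.Dict.keys_empty], fun v => by simp [PySem.Dict.get?_empty]⟩

lemma inv_add (w : List Int) (dd : PySem.Dict Int Int) (y : Int) (h : MsInv w dd) :
    MsInv (w ++ [y]) (msAdd dd y) := by
  obtain ⟨hnd, hget⟩ := h
  unfold msAdd
  by_cases hc : dd.contains y
  · have hy0 : ¬ w.count y = 0 := by
      intro h0
      rw [PySem.Dict.contains_eq_isSome_get?, hget y, if_pos h0] at hc
      simp at hc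
    have hgd : dd.getD y 0 = (w.count y : Int) := by
      rw [PySem.Dict.getD_eq_get?_getD, hget y, if_neg hy0]; rfl
    rw [if_pos hc]
    refine ⟨PySem.Dict.nodup_keys_insert dd y _ hnd, fun v => ?_⟩
    rw [PySem.Dict.get?_insert]
    by_cases hv : v = y
    · subst hv
      have hca : (w ++ [v]).count v = w.count v + 1 := by simp
      rw [if_pos rfl, hgd, hca, if_neg (by omega)]
      norm_cast
    · have hca : (w ++ [y]).count v = w.count v := by
        simp [List.count_append, Ne.symm hv]
      rw [if_neg hv, hca, hget v]
  · have hy0 : w.count y = 0 := by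
      by_contra h0
      have hgy := hget y
      rw [if_neg h0] at hgy
      rw [PySem.Dict.contains_eq_isSome_get?, hgy] at hc
      simp at hc
    rw [if_neg hc]
    refine ⟨PySem.Dict.nodup_keys_insert dd y _ hnd, fun v => ?_⟩
    rw [PySem.Dict.get?_insert]
    by_cases hv : v = y
    · subst hv
      have hca : (w ++ [v]).count v = w.count v + 1 := by simp
      rw [if_pos rfl, hca, hy0, if_neg (by omega)]
      norm_num
    · have hca : (w ++ [y]).count v = w.count v := by
        simp [List.count_append, Ne.symm hv]
      rw [if_neg hv, hca, hget v]

lemma inv_remove (x : Int) (w : List Int) (dd : PySem.Dict Int Int) (h : MsInv (x :: w) dd) :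
    ∃ dd', msRemove dd x = some dd' ∧ MsInv w dd' := by
  obtain ⟨hnd, hget⟩ := h
  have hcx : (x :: w).count x = w.count x + 1 := by simp
  have hgx : dd.get? x = some ((w.count x : Int) + 1) := by
    rw [hget x, if_neg (by omega), hcx]
    norm_cast
  have hc : dd.contains x = true := by
    rw [PySem.Dict.contains_eq_isSome_get?, hgx]; rfl
  have hgd : dd.getD x 0 = (w.count x : Int) + 1 := by
    rw [PySem.Dict.getD_eq_get?_getD, hgx]; rfl
  have hcount : ∀ v : Int, v ≠ x → (x :: w).count v = w.count v := by
    intro v hv; simp [Ne.symm hv]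
  by_cases h1 : w.count x = 0
  · have hgd1 : dd.getD x 0 = 1 := by rw [hgd, h1]; norm_num
    refine ⟨dd.erase x, by simp [msRemove, hc, hgd1], dict_keys_erase_nodup dd x hnd,
      fun v => ?_⟩
    rw [dict_get?_erase dd x v hnd]
    by_cases hv : v = x
    · subst hv; rw [if_pos rfl, if_pos h1]
    · rw [if_neg hv, hget v, hcount v hv]
  · have hgd1 : ¬ dd.getD x 0 = 1 := by rw [hgd]; omega
    refine ⟨dd.insert x (dd.getD x 0 - 1), by simp [msRemove, hc, hgd1],
      PySem.Dict.nodup_keys_insert dd x _ hnd, fun v => ?_⟩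
    rw [PySem.Dict.get?_insert]
    by_cases hv : v = x
    · subst hv
      rw [if_pos rfl, if_neg h1, hgd]
      congr 1; ring
    · rw [if_neg hv, hget v, hcount v hv]

lemma inv_foldl (w : List Int) : MsInv w (w.foldl msAdd PySem.Dict.empty) := by
  induction w using List.reverseRecOn with
  | nil => exact inv_empty
  | append_singleton t y ih => rw [List.foldl_append]; exact inv_add t _ y ih

lemma inv_size (w : List Int) (dd : PySem.Dict Int Int) (h : MsInv w dd) :
    (dd.size : Int) = winDistinct w := by
  obtain ⟨hnd, hget⟩ := h
  have hmem : ∀ v : Int, v ∈ dd.keys ↔ v ∈ PySem.Set.ofList w := by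
    intro v
    rw [PySem.Set.mem_ofList]
    constructor
    · intro hv
      by_contra hw
      have h0 : w.count v = 0 := List.count_eq_zero.mpr hw
      exact (PySem.Dict.get?_eq_none_iff_not_mem_keys dd v).mp (by rw [hget v, if_pos h0]) hv
    · intro hv
      by_contra hk
      have := (PySem.Dict.get?_eq_none_iff_not_mem_keys dd v).mpr hk
      rw [hget v, if_neg (by simpa [List.count_eq_zero] using hv)] at this
      exact Option.some_ne_none _ this
  have hperm : dd.keys.Perm (PySem.Set.ofList w) :=
    (List.perm_ext_iff_of_nodup hnd (PySem.Set.nodup_ofList w)).mpr hmem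
  have hlen : dd.keys.length = (PySem.Set.ofList w).length := hperm.length_eq
  have hsz : dd.size = dd.keys.length := by
    simp [PySem.Dict.size, PySem.Dict.keys]
  rw [winDistinct, PySem.Set.len, hsz, hlen]

lemma loop_eq (shows : List Int) (dm : Nat) :
    ∀ (k i : Nat) (dd : PySem.Dict Int Int) (m : Int),
      (i : Int) + k = (shows.length : Int) - (dm + 1) →
      MsInv (win shows (dm + 1) i) dd →
      (match (PySem.List.pyRange i ((shows.length : Int) - (dm + 1)) 1).foldl
          (loopA shows ((dm : Int) + 1)) (some (dd, m)) with
        | some (_, mm) => mm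
        | none => 0)
      = (PySem.List.pyRange ((i : Int) + 1) ((shows.length : Int) - (dm + 1) + 1) 1).foldl
          (loopB shows ((dm : Int) + 1)) m := by
  intro k
  induction k with
  | zero =>
    intro i dd m hik hinv
    rw [PySem.List.pyRange_one_eq_nil (by omega), PySem.List.pyRange_one_eq_nil (by omega)]
    rfl
  | succ k ih =>
    intro i dd m hik hinv
    have hin : i + (dm + 1) < shows.length := by omega
    have hi : i < shows.length := by omega
    -- the window at i starts with shows[i]
    have hwin : win shows (dm + 1) i = shows[i] :: (shows.drop (i + 1)).take dm := by
      rw [win, List.drop_eq_getElem_cons hi, List.take_succ_cons]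
    rw [hwin] at hinv
    obtain ⟨dd', heq, hinv'⟩ := inv_remove _ _ dd hinv
    have hgetI : PySem.List.pyGetD shows (i : Int) 0 = shows[i] := by
      rw [PySem.List.pyGetD_natCast, List.getD_eq_getElem _ _ hi]
    have hgetJ : PySem.List.pyGetD shows ((i : Int) + ((dm : Int) + 1)) 0
        = shows[i + (dm + 1)] := by
      have hcast : (i : Int) + ((dm : Int) + 1) = ((i + (dm + 1) : Nat) : Int) := by push_cast; ring
      rw [hcast, PySem.List.pyGetD_natCast, List.getD_eq_getElem _ _ hin]
    -- the next window is the tail window plus the incoming element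
    have hwin1 : win shows (dm + 1) (i + 1) = (shows.drop (i + 1)).take dm ++ [shows[i + (dm + 1)]] := by
      rw [win, List.take_add_one, List.getElem?_drop,
        List.getElem?_eq_getElem (by omega : i + 1 + dm < shows.length)]
      simp only [Option.toList_some, show i + 1 + dm = i + (dm + 1) from by omega]
    have hinv2 : MsInv (win shows (dm + 1) (i + 1)) (msAdd dd' shows[i + (dm + 1)]) := by
      rw [hwin1]; exact inv_add _ _ _ hinv'
    have hsz : ((msAdd dd' shows[i + (dm + 1)]).size : Int) = winDistinct (win shows (dm + 1) (i + 1)) :=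
      inv_size _ _ hinv2
    have hstep : loopA shows ((dm : Int) + 1) (some (dd, m)) (i : Int)
        = some (msAdd dd' shows[i + (dm + 1)],
            min m ((msAdd dd' shows[i + (dm + 1)]).size : Int)) := by
      simp only [loopA, hgetI, hgetJ, heq]
    have hsliceB : PySem.List.slice shows (some ((i : Int) + 1)) (some ((i : Int) + 1 + ((dm : Int) + 1)))
        = win shows (dm + 1) (i + 1) := by
      have h1 : (i : Int) + 1 = ((i + 1 : Nat) : Int) := by push_cast; ring
      have h2 : (i : Int) + 1 + ((dm : Int) + 1) = ((i + 1 : Nat) : Int) + ((dm + 1 : Nat) : Int) := by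
        push_cast; ring
      rw [h2, h1, PySem.List.slice_natCast_add]
      rfl
    have hstepB : loopB shows ((dm : Int) + 1) m ((i : Int) + 1)
        = min m (winDistinct (win shows (dm + 1) (i + 1))) := by
      rw [loopB, hsliceB]
    have hcast1 : (i : Int) + 1 = ((i + 1 : Nat) : Int) := by push_cast; ring
    rw [PySem.List.pyRange_one_cons (a := (i : Int))
        (b := (shows.length : Int) - ((dm : Int) + 1)) (by omega),
      PySem.List.pyRange_one_cons (a := (i : Int) + 1)
        (b := (shows.length : Int) - ((dm : Int) + 1) + 1) (by omega),
      List.foldl_cons, List.foldl_cons, hstep, hstepB, ← hsz, hcast1]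
    exact ih (i + 1) _ _ (by push_cast; omega) hinv2

-- ===== VERDICT (by name: the statement is the Claim_ definition above) =====
theorem minimum_show_spec : Claim_equal_minimum_show := by
  intro d shows _ hpre
  unfold Spec_minimum_show
  rcases hpre with hd | ⟨hd, hs⟩
  · -- 1 ≤ d
    lift d to ℕ using (by omega) with dn
    obtain ⟨dm, rfl⟩ : ∃ dm, dn = dm + 1 := ⟨dn - 1, by omega⟩
    unfold minimum_show minimum_show_alt
    simp only [PySem.List.len_eq]
    have hslice0 : PySem.List.slice shows none (some ((dm + 1 : Nat) : Int)) = win shows (dm + 1) 0 := by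
      rw [PySem.List.slice_to shows (b := ((dm + 1 : Nat) : Int)) (by positivity), win,
        List.drop_zero]
      norm_num
    rw [hslice0]
    have hframe := inv_foldl (win shows (dm + 1) 0)
    have hsz := inv_size _ _ hframe
    by_cases hN : shows.length < dm + 1
    · rw [PySem.List.pyRange_one_eq_nil (by push_cast; omega),
        PySem.List.pyRange_one_eq_nil (by push_cast; omega)]
      simpa using hsz
    · have hmain := loop_eq shows dm (shows.length - (dm + 1)) 0
        ((win shows (dm + 1) 0).foldl msAdd PySem.Dict.empty)
        (((win shows (dm + 1) 0).foldl msAdd PySem.Dict.empty).size : Int)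
        (by push_cast; omega) hframe
      have hc0 : ((0 : Nat) : Int) = (0 : Int) := rfl
      rw [hc0] at hmain
      have hcD : ((dm + 1 : Nat) : Int) = (dm : Int) + 1 := by push_cast; ring
      rw [hcD]
      rw [hmain, hsz]
      norm_num
  · subst hd hs
    decide
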